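-- pv_equiv track=rewrite | github.com/chingsley/6314_ml_project_sample_collection | EnergySmells_Verified/ExtraUsageOfArrays/augmented/count_alternating_pairs/smelly_count_alternating_pairs.py | count_alternating_pairs
-- ===== SOURCE A (Python) =====
-- def count_alternating_pairs(s):
--     """Counts alternating pairs by deleting elements from a list, leading to backtracking"""
--     arr = list(s)
--     pairs = 0
--     j = 0
--     while j < len(arr) - 1:
--         if arr[j] != arr[j + 1]:
--             pairs += 1
--             del arr[j : j + 2]
--             j = max(0, j - 1)
--         else:
--             j += 1
--     return pairs
-- ===== SOURCE B (Python) =====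
-- def count_alternating_pairs(s):
--     """One pass: the surviving prefix is always a run of one character, so keep
--     only (ch, k) = its character and length; a differing char cancels (pop),
--     an equal or first char extends (push)."""
--     ch = ''
--     k = 0
--     pairs = 0
--     for c in s:
--         if k and c != ch:
--             k -= 1
--             pairs += 1
--         else:
--             ch = c
--             k += 1
--     return pairs
-- ===== Notes on version B (the rewrite author's own statement) =====
-- stated objective: faster
-- what changed: Replaces the backtracking delete-from-list loop with a single pass keeping only the run-length of the surviving prefix (a collapsed stack), popping on a differing character.
import Mathlib
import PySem

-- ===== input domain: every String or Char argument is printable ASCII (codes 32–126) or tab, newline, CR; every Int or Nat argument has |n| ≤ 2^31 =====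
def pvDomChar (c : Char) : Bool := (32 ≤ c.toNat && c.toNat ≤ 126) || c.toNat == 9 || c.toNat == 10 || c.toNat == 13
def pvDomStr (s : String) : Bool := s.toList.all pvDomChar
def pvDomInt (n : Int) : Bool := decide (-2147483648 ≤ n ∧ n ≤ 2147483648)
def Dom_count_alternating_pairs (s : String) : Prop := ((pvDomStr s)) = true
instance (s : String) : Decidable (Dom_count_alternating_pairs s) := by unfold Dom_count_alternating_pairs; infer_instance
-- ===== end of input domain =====

-- B replaces A's quadratic delete-and-backtrack loop by one pass keeping only the
-- run length of the surviving prefix (objective: faster, asymptotic).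

-- ===== PORT A =====
-- A's while loop; j is always ≥ 0 in Python, so it is a Nat here and
-- Python's max(0, j-1) is exactly Nat subtraction j - 1.  The loop guard
-- guarantees j and j+1 are in range, so arr[j] is arr.getD j ' '.
-- 'del arr[j:j+2]' is arr.take j ++ arr.drop (j+2).  The fuel argument only
-- makes the recursion structural; 2*len+3 always exceeds the number of
-- iterations (proved in pvLoopA_fuel-independence below), so it never runs out.
def pvLoopA : Nat → List Char → Nat → Int → Int
  | 0, _, _, pairs => pairs
  | fuel + 1, arr, j, pairs =>
    if j < arr.length - 1 then
      if arr.getD j ' ' ≠ arr.getD (j + 1) ' ' then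
        pvLoopA fuel (arr.take j ++ arr.drop (j + 2)) (j - 1) (pairs + 1)
      else
        pvLoopA fuel arr (j + 1) pairs
    else pairs

def count_alternating_pairs (s : String) : Int :=
  pvLoopA (2 * s.toList.length + 3) s.toList 0 0

-- ===== PORT B =====
def pvLoopB (ch : Char) (k : Nat) (pairs : Int) : List Char → Int
  | [] => pairs
  | c :: rest =>
    if k ≠ 0 ∧ c ≠ ch then pvLoopB ch (k - 1) (pairs + 1) rest
    else pvLoopB c (k + 1) pairs rest

def count_alternating_pairs_alt (s : String) : Int :=
  pvLoopB ' ' 0 0 s.toList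

-- ===== PRECONDITION & SPEC =====
def Spec_count_alternating_pairs (s : String) (out : Int) : Prop := out = count_alternating_pairs_alt s
instance (s : String) (out : Int) : Decidable (Spec_count_alternating_pairs s out) := by unfold Spec_count_alternating_pairs; infer_instance

-- ===== CLAIM (what is proved, stated in full; the proofs are below) =====
def Claim_equal_count_alternating_pairs : Prop := ∀ (s : String), Dom_count_alternating_pairs s → Spec_count_alternating_pairs s (count_alternating_pairs s)

-- ===== LEMMAS AND PROOFS =====

-- Invariant: at A's loop head the prefix arr[0..j] is a constant run; with
-- arr = replicate k ch ++ rest, j = k - 1 and enough fuel, A's loop computes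
-- B's loop.  The fuel bound 2*rest.length + (if k = 0 then 2 else k) + 1
-- strictly decreases along A's steps (the k = 0 step consumes no fuel here,
-- it is a re-bracketing of the same call).
theorem pvLoop_eq (rest : List Char) :
    ∀ (fuel : Nat) (ch : Char) (k : Nat) (pairs : Int),
      2 * rest.length + (if k = 0 then 2 else k) + 1 ≤ fuel →
      pvLoopA fuel (List.replicate k ch ++ rest) (k - 1) pairs = pvLoopB ch k pairs rest := by
  induction rest with
  | nil =>
    intro fuel ch k pairs hf
    match fuel with
    | f + 1 =>
      rw [pvLoopA]
      simp [pvLoopB]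
  | cons c rest' ih =>
    intro fuel ch k pairs hf
    match k with
    | 0 =>
      have h1 := ih fuel c 1 pairs (by simp at hf ⊢; omega)
      simp only [List.replicate, List.nil_append, List.singleton_append, Nat.sub_self] at h1 ⊢
      rw [show (0:Nat) - 1 = 0 from rfl, h1]
      simp [pvLoopB]
    | m + 1 =>
      match fuel with
      | 0 => omega
      | f + 1 =>
        rw [pvLoopA]
        have hj : m + 1 - 1 < (List.replicate (m + 1) ch ++ c :: rest').length - 1 := by
          simp only [List.length_append, List.length_replicate, List.length_cons]; omega
        rw [if_pos hj]
        have hgj : (List.replicate (m + 1) ch ++ c :: rest').getD (m + 1 - 1) ' ' = ch := by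
          have hm : m + 1 - 1 < (List.replicate (m + 1) ch).length := by simp
          rw [List.getD_eq_getElem?_getD, List.getElem?_append_left hm]
          simp
        have hgj1 : (List.replicate (m + 1) ch ++ c :: rest').getD (m + 1 - 1 + 1) ' ' = c := by
          have hm : m + 1 - 1 + 1 = (List.replicate (m + 1) ch).length := by simp
          rw [List.getD_eq_getElem?_getD, hm, List.getElem?_append_right (le_refl _)]
          simp
        rw [hgj, hgj1]
        by_cases hc : ch = c
        · -- equal characters: A advances j, B pushes
          rw [if_neg (by simp [hc])]
          have h1 := ih f ch (m + 2) pairs (by simp at hf ⊢; omega)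
          have hrepl : List.replicate (m + 2) ch ++ rest' = List.replicate (m + 1) ch ++ c :: rest' := by
            subst hc
            rw [show m + 2 = (m + 1) + 1 from rfl, List.replicate_succ']
            simp
          rw [hrepl, show m + 2 - 1 = m + 1 - 1 + 1 from rfl] at h1
          rw [h1]
          simp [pvLoopB, hc]
        · -- differing characters: A deletes the pair, B pops
          rw [if_pos hc]
          have htake : (List.replicate (m + 1) ch ++ c :: rest').take (m + 1 - 1) = List.replicate m ch := by
            rw [List.take_append_of_le_length (by simp)]
            simp [List.take_replicate]
          have hdrop : (List.replicate (m + 1) ch ++ c :: rest').drop (m + 1 - 1 + 2) = rest' := by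
            have hm : m + 1 - 1 + 2 = (List.replicate (m + 1) ch).length + 1 := by simp
            rw [hm]
            rw [show (List.replicate (m + 1) ch).length + 1 = (m+1)+1 by simp]
            rw [show List.replicate (m + 1) ch ++ c :: rest' = (List.replicate (m + 1) ch ++ [c]) ++ rest' by simp]
            rw [List.drop_append_of_le_length (by simp)]
            simp
          rw [htake, hdrop]
          have h1 := ih f ch m (pairs + 1) (by simp only [List.length_cons, if_neg (Nat.succ_ne_zero m)] at hf; split_ifs <;> omega)
          rw [show m + 1 - 1 - 1 = m - 1 from rfl, h1]
          simp [pvLoopB, Ne.symm hc]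

-- ===== VERDICT (by name: the statement is the Claim_ definition above) =====
theorem count_alternating_pairs_spec : Claim_equal_count_alternating_pairs := by
  intro s _
  unfold Spec_count_alternating_pairs count_alternating_pairs count_alternating_pairs_alt
  have h := pvLoop_eq s.toList (2 * s.toList.length + 3) ' ' 0 0 (by simp)
  simpa using h
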